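-- pv_equiv track=rewrite | github.com/bigeyesung/Common_DS | python_test/pythonTest.py | GetMergeList
-- ===== SOURCE A (Python) =====
-- def GetMergeList(n):
--     arrs=[[]]
--     #iterate n times:
--     #   for each iteration, append a new array through: copy previous array and insert current value
--     for ind in range(1,n+1):
--         preArr=arrs[ind-1].copy()
--         preArr.append(ind)
--         arrs.append(preArr)
--     arrs.pop(0)
--     return arrs
-- ===== SOURCE B (Python) =====
-- def GetMergeList(n):
--     return [list(range(1, i + 1)) for i in range(1, n + 1)]
-- ===== Notes on version B (the rewrite author's own statement) =====
-- stated objective: simpler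
-- what changed: B builds each prefix row directly as list(range(1, i+1)) in one comprehension, dropping A's accumulator that copies the previous row, appends, and pops a leading empty seed row.
import Mathlib
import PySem

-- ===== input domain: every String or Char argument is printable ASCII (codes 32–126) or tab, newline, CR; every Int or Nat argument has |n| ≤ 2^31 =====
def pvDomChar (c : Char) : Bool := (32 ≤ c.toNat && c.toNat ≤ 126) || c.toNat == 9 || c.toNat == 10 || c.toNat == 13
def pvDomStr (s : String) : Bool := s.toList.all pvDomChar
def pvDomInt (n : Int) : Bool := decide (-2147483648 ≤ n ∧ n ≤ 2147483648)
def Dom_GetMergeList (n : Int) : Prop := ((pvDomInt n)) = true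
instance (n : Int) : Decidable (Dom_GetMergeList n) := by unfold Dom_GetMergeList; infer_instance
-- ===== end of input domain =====

-- ===== PORT A =====
-- arrs=[[]]; for ind in range(1,n+1): copy arrs[ind-1], append ind, append; arrs.pop(0)
-- arrs[ind-1] is ported with pyGet? (IndexError = none); the none branch is unreachable.
def GetMergeList (n : Int) : List (List Int) :=
  let arrs : List (List Int) :=
    (PySem.List.pyRange 1 (n+1) 1).foldl
      (fun arrs ind =>
        match PySem.List.pyGet? arrs (ind - 1) with
        | some preArr => arrs ++ [preArr ++ [ind]]
        | none => arrs)
      [[]]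
  arrs.tail  -- arrs.pop(0): the returned element is discarded

-- ===== PORT B =====
-- B: [list(range(1, i + 1)) for i in range(1, n + 1)]
def GetMergeList_alt (n : Int) : List (List Int) :=
  (PySem.List.pyRange 1 (n+1) 1).map (fun i => PySem.List.pyRange 1 (i+1) 1)

-- ===== PRECONDITION & SPEC =====
def Spec_GetMergeList (n : Int) (out : List (List Int)) : Prop := out = GetMergeList_alt n
instance (n : Int) (out : List (List Int)) : Decidable (Spec_GetMergeList n out) := by unfold Spec_GetMergeList; infer_instance

-- ===== CLAIM (what is proved, stated in full; the proofs are below) =====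
def Claim_equal_GetMergeList : Prop := ∀ (n : Int), Dom_GetMergeList n → Spec_GetMergeList n (GetMergeList n)

-- ===== LEMMAS AND PROOFS =====

-- loop invariant: after the iterations for ind = 1..k, arrs = [prefix j for j = 0..k]
lemma gml_inv (k : Nat) :
    (PySem.List.pyRange 1 ((k : Int)+1) 1).foldl
      (fun arrs ind =>
        match PySem.List.pyGet? arrs (ind - 1) with
        | some preArr => arrs ++ [preArr ++ [ind]]
        | none => arrs)
      [[]] =
    (List.range (k+1)).map (fun (j : Nat) => PySem.List.pyRange 1 ((j : Int)+1) 1) := by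
  induction k with
  | zero => decide
  | succ k ih =>
      have h1 : (1 : Int) ≤ (k : Int) + 1 := by omega
      have hsp : PySem.List.pyRange 1 (((k+1 : Nat) : Int)+1) 1
          = PySem.List.pyRange 1 ((k : Int)+1) 1 ++ [(k : Int)+1] := by
        push_cast
        exact PySem.List.pyRange_one_succ_right h1
      rw [hsp, List.foldl_append, ih]
      have hget : PySem.List.pyGet?
          ((List.range (k+1)).map (fun (j : Nat) => PySem.List.pyRange 1 ((j : Int)+1) 1))
          (((k : Int)+1) - 1) = some (PySem.List.pyRange 1 ((k : Int)+1) 1) := by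
        have h2 : ((k : Int)+1) - 1 = ((k : Nat) : Int) := by ring
        rw [h2, PySem.List.pyGet?_natCast]
        simp
      simp only [List.foldl_cons, List.foldl_nil, hget]
      rw [List.range_succ (n := k+1), List.map_append]
      have h3 : PySem.List.pyRange 1 ((k : Int)+1) 1 ++ [(k : Int)+1]
          = PySem.List.pyRange 1 (((k : Int)+1)+1) 1 :=
        (PySem.List.pyRange_one_succ_right h1).symm
      simp [h3]

-- ===== VERDICT (by name: the statement is the Claim_ definition above) =====
theorem GetMergeList_spec : Claim_equal_GetMergeList := by
  intro n _
  unfold Spec_GetMergeList GetMergeList GetMergeList_alt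
  by_cases hn : n ≤ 0
  · have h0 : PySem.List.pyRange 1 (n+1) 1 = [] :=
      PySem.List.pyRange_one_eq_nil (by omega)
    simp [h0]
  · obtain ⟨k, hk⟩ : ∃ k : Nat, n = (k : Int) := ⟨n.toNat, by omega⟩
    subst hk
    rw [gml_inv k]
    rw [show PySem.List.pyRange 1 ((k : Int)+1) 1
        = (List.range ((((k : Int)+1) - 1).toNat)).map (fun (j : Nat) => 1 + (j : Int))
      from PySem.List.pyRange_one 1 ((k : Int)+1)]
    rw [List.range_succ_eq_map]
    simp only [List.map_cons, List.tail_cons, List.map_map]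
    have hnat : (((k : Int)+1) - 1).toNat = k := by omega
    rw [hnat]
    apply List.map_congr_left
    intro j _
    simp only [Function.comp]
    congr 1
    push_cast
    ring
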